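-- pv_equiv track=rewrite | github.com/TheDuckGoesQuark/UCIOT | take2/sensor/network/router/interzone.py | get_difference_counts
-- ===== SOURCE A (Python) =====
-- from typing import List, Dict, Deque, Tuple, Optional, Set
--
-- def get_difference_counts(path_one: List[int], path_two: List[int]) -> Tuple[int, int]:
--     """Returns the number of elements shared and not shared between the two lists"""
--     shared = 0
--     not_shared = 0
--     for hop in path_one:
--         if hop not in path_two:
--             not_shared += 1
--         else:
--             shared += 1
--
--     return shared, not_shared
-- ===== SOURCE B (Python) =====
-- from collections import Counter
-- from typing import List, Tuple
--
-- def get_difference_counts(path_one: List[int], path_two: List[int]) -> Tuple[int, int]: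
--     """Returns the number of elements shared and not shared between the two lists"""
--     shared = 0
--     for value, count in Counter(path_one).items():
--         if value in path_two:
--             shared += count
--     return shared, len(path_one) - shared
-- ===== Notes on version B (the rewrite author's own statement) =====
-- stated objective: alternative
-- what changed: B aggregates path_one into a Counter frequency table and loops once over its distinct (value,count) items, testing membership per distinct value and adding the stored multiplicity; not_shared is derived as len(path_one) - shared instead of a second accumulator.
import Mathlib
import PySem

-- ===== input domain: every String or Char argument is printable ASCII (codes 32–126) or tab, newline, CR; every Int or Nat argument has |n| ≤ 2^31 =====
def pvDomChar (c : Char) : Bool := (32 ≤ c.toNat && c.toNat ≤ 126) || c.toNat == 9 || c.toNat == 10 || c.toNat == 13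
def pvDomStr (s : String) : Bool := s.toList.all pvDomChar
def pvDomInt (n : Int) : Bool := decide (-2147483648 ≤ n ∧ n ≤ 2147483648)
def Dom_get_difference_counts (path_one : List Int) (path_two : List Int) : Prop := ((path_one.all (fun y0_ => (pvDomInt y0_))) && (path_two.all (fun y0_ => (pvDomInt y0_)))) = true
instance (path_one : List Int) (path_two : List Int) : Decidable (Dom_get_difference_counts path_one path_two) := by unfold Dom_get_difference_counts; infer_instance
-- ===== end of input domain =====

-- ===== PORT A =====
-- One honest line: B builds a Counter of path_one and scans its distinct (value, count) items,
-- deriving not_shared as length - shared; alternative decomposition, not claimed faster.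
def get_difference_counts (path_one : List Int) (path_two : List Int) : Int × Int :=
  let r := path_one.foldl
    (fun (acc : Int × Int) hop =>
      if ¬ (hop ∈ path_two) then (acc.1, acc.2 + 1) else (acc.1 + 1, acc.2))
    (0, 0)
  (r.1, r.2)

-- ===== PORT B =====
def get_difference_counts_alt (path_one : List Int) (path_two : List Int) : Int × Int :=
  let shared := (PySem.Dict.counter path_one).items.foldl
    (fun (s : Int) (kv : Int × Int) => if kv.1 ∈ path_two then s + kv.2 else s) 0
  (shared, (path_one.length : Int) - shared)

-- ===== PRECONDITION & SPEC =====
def Spec_get_difference_counts (path_one : List Int) (path_two : List Int) (out : Int × Int) : Prop := out = get_difference_counts_alt path_one path_two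
instance (path_one : List Int) (path_two : List Int) (out : Int × Int) : Decidable (Spec_get_difference_counts path_one path_two out) := by unfold Spec_get_difference_counts; infer_instance

-- ===== CLAIM (what is proved, stated in full; the proofs are below) =====
def Claim_equal_get_difference_counts : Prop := ∀ (path_one : List Int) (path_two : List Int), Dom_get_difference_counts path_one path_two → Spec_get_difference_counts path_one path_two (get_difference_counts path_one path_two)

-- ===== LEMMAS AND PROOFS =====

-- ===== VERDICT (by name: the statement is the Claim_ definition above) =====
-- sum of a (guarded) point indicator over a nodup list containing x
lemma sum_point_indicator (q : Int → Bool) (x : Int) :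
    ∀ (S : List Int), S.Nodup → x ∈ S →
      (S.map (fun k => if q k ∧ k = x then (1 : Int) else 0)).sum
        = if q x then (1 : Int) else 0 := by
  intro S
  induction S with
  | nil => intro _ h; cases h
  | cons s S ih =>
    intro hnd hmem
    rcases List.nodup_cons.mp hnd with ⟨hs, hnd'⟩
    simp only [List.map_cons, List.sum_cons]
    rcases List.mem_cons.mp hmem with h | h
    · subst h
      have : (S.map (fun k => if q k ∧ k = x then (1 : Int) else 0)).sum = 0 := by
        apply List.sum_eq_zero
        intro y hy
        rcases List.mem_map.mp hy with ⟨k, hk, rfl⟩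
        have : k ≠ x := fun e => hs (e ▸ hk)
        simp [this]
      rw [this]
      by_cases hq : q x = true <;> simp [hq]
    · have hne : x ≠ s := fun e => hs (e ▸ h)
      have := ih hnd' h
      rw [this]
      have : ¬ (q s = true ∧ s = x) := fun ⟨_, e⟩ => hne e.symm
      simp [this]

-- counting via distinct keys with multiplicities equals countP
lemma sum_counts_eq_countP (q : Int → Bool) :
    ∀ (xs : List Int) (S : List Int), S.Nodup → (∀ a, a ∈ xs → a ∈ S) →
      (S.map (fun k => if q k then (xs.count k : Int) else 0)).sum
        = (xs.countP q : Int) := by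
  intro xs
  induction xs with
  | nil =>
    intro S _ _
    simp
  | cons x xs ih =>
    intro S hnd hsub
    have hx : x ∈ S := hsub x (List.mem_cons_self ..)
    have hsub' : ∀ a, a ∈ xs → a ∈ S := fun a ha => hsub a (List.mem_cons_of_mem _ ha)
    have split : (S.map (fun k => if q k then ((x :: xs).count k : Int) else 0))
        = S.map (fun k => (if q k then (xs.count k : Int) else 0)
            + (if q k ∧ k = x then (1 : Int) else 0)) := by
      apply List.map_congr_left
      intro k _
      by_cases hq : q k = true
      · by_cases hk : k = x
        · subst hk; simp [hq, List.count_cons_self]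
        · have : (x :: xs).count k = xs.count k := by
            rw [List.count_cons]
            simp [Ne.symm hk]
          simp [hq, hk, this]
      · simp [hq]
    rw [split, PySem.List.sum_map_add_int, ih S hnd hsub',
        sum_point_indicator q x S hnd hx, List.countP_cons]
    by_cases hq : q x = true <;> simp [hq]

-- A's fold with a general accumulator
lemma portA_foldl (path_two : List Int) :
    ∀ (xs : List Int) (s n : Int),
      xs.foldl (fun (acc : Int × Int) hop =>
          if ¬ (hop ∈ path_two) then (acc.1, acc.2 + 1) else (acc.1 + 1, acc.2)) (s, n)
        = (s + (xs.countP (fun h => decide (h ∈ path_two)) : Int),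
           n + (xs.countP (fun h => ¬ decide (h ∈ path_two)) : Int)) := by
  intro xs
  induction xs with
  | nil => intro s n; simp
  | cons x xs ih =>
    intro s n
    by_cases hx : x ∈ path_two
    · rw [List.foldl_cons, if_neg (by simpa using hx), ih]
      simp only [List.countP_cons, hx, Prod.mk.injEq]
      refine ⟨by simp; ring, by simp⟩
    · rw [List.foldl_cons, if_pos (by simpa using hx), ih]
      simp only [List.countP_cons, hx, Prod.mk.injEq]
      refine ⟨by simp, by simp; ring⟩

-- B's shared equals countP membership
lemma portB_shared (path_one path_two : List Int) :
    (PySem.Dict.counter path_one).items.foldl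
        (fun (s : Int) (kv : Int × Int) => if kv.1 ∈ path_two then s + kv.2 else s) 0
      = (path_one.countP (fun h => decide (h ∈ path_two)) : Int) := by
  have hbody : ∀ (s : Int) (kv : Int × Int),
      (if kv.1 ∈ path_two then s + kv.2 else s)
        = s + (if kv.1 ∈ path_two then kv.2 else 0) := by
    intro s kv; by_cases h : kv.1 ∈ path_two <;> simp [h]
  have hfun : (fun (s : Int) (kv : Int × Int) => if kv.1 ∈ path_two then s + kv.2 else s)
      = (fun (s : Int) (kv : Int × Int) => s + if kv.1 ∈ path_two then kv.2 else 0) := by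
    funext s kv; exact hbody s kv
  rw [hfun, PySem.List.foldl_add]
  simp only [PySem.Dict.items_counter, List.map_map, zero_add]
  have : ((PySem.Set.ofList path_one).map
      ((fun kv : Int × Int => if kv.1 ∈ path_two then kv.2 else 0)
        ∘ fun k => (k, (path_one.count k : Int))))
      = (PySem.Set.ofList path_one).map
        (fun k => if decide (k ∈ path_two) = true then (path_one.count k : Int) else 0) := by
    apply List.map_congr_left
    intro k _
    by_cases h : k ∈ path_two <;> simp [h]
  rw [this]
  exact sum_counts_eq_countP (fun k => decide (k ∈ path_two)) path_one
    (PySem.Set.ofList path_one) (PySem.Set.nodup_ofList path_one)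
    (fun a ha => (PySem.Set.mem_ofList ..).mpr ha)

-- ===== VERDICT (by name: the statement is the Claim_ definition above) =====
theorem get_difference_counts_spec : Claim_equal_get_difference_counts := by
  intro path_one path_two _
  unfold Spec_get_difference_counts get_difference_counts get_difference_counts_alt
  simp only []
  rw [portA_foldl path_two path_one 0 0, portB_shared path_one path_two]
  have hlen : path_one.length
      = path_one.countP (fun h => decide (h ∈ path_two))
        + path_one.countP (fun h => ¬ decide (h ∈ path_two)) := by
    rw [← List.length_eq_countP_add_countP (fun h => decide (h ∈ path_two))]
  simp only [Prod.mk.injEq]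
  refine ⟨by ring, ?_⟩
  omega
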